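-- pv_equiv track=rewrite | github.com/DrMelt/TextTools | TextTools-code/Functions/functions.py | segmentationLine
-- ===== SOURCE A (Python) =====
-- def segmentationLine(text: str):  # 分割str为行
--     line = []
--     index = 0
--     indexIn = 0
--     while index < len(text):
--         if text[index] == "\n" or text[index - 6:index] == '</w:r>':
--             line.append(text[indexIn:index])
--             # line.append('\n')
--             indexIn = index
--         index += 1
--     line.append(text[indexIn:])
--     return line
-- ===== SOURCE B (Python) =====
-- def segmentationLine(text: str):  # merge two streams of matches (str.find) instead of testing every char
--     n = len(text)
--     line = []
--     prev = 0
--     p = 0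
--     nl = text.find('\n')
--     j = text.find('</w:r>')
--     while True:
--         if 0 <= nl < p:  # newline candidate consumed: advance its stream
--             nl = text.find('\n', p)
--         if 0 <= j and j + 6 < p:  # tag candidate consumed: advance its stream
--             j = text.find('</w:r>', p - 6 if p >= 6 else 0)
--         b = nl if nl != -1 else None
--         if j != -1 and j + 6 < n and (b is None or j + 6 < b):
--             b = j + 6
--         if b is None:
--             break
--         line.append(text[prev:b])
--         prev = b
--         p = b + 1
--     line.append(text[prev:])
--     return line
-- ===== Notes on version B (the rewrite author's own statement) =====
-- stated objective: faster
-- what changed: Replaces A's per-character state-machine scan (testing every index for a newline or a trailing '</w:r>') by a merge of two str.find match streams: the next newline and the next tag occurrence are cached and a stream is re-searched only once its candidate is consumed, so the loop jumps from boundary to boundary.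
import Mathlib
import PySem

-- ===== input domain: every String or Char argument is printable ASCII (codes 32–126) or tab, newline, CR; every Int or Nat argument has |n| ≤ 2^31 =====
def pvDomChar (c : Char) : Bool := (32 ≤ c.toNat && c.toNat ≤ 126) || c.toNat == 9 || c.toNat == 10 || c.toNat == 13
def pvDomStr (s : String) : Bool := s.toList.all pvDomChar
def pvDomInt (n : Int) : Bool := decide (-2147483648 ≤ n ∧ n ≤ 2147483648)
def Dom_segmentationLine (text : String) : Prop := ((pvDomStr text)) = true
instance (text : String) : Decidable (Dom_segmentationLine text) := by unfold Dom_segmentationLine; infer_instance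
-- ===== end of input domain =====

-- B replaces A's per-character state machine by a merge of two str.find match streams
-- (newline positions and '</w:r>' tag ends), re-searching a stream only when its cached
-- candidate is consumed; equivalence of return values is proved below.

-- ===== PORT A =====
-- A's while loop, state (index, indexIn, line)
def segLoopA (cs : List Char) (index indexIn : Nat) (line : List String) : List String :=
  if _h : index < cs.length then
    if PySem.List.pyGet? cs (index : Int) == some '\n'
        || PySem.List.slice cs (some ((index : Int) - 6)) (some (index : Int)) == "</w:r>".toList
    then segLoopA cs (index + 1) index
          (line ++ [String.ofList (PySem.List.slice cs (some (indexIn : Int)) (some (index : Int)))])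
    else segLoopA cs (index + 1) indexIn line
  else line ++ [String.ofList (PySem.List.slice cs (some (indexIn : Int)) none)]
termination_by cs.length - index

def segmentationLine (text : String) : List String :=
  segLoopA text.toList 0 0 []

-- ===== PORT B =====
-- B's while loop, state (prev, p, nl, j, line); fuel cs.length + 1 suffices because p
-- strictly increases and never exceeds cs.length (the fuel-0 branch repeats the break branch)
-- the candidate-selection block of B's loop body (b = nl / j+6 / None)
def segNextB (cs : List Char) (nl j : Int) : Option Int :=
  let b : Option Int := if nl != -1 then some nl else none
  if (j != -1) && decide (j + 6 < (cs.length : Int)) &&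
      (match b with | none => true | some bv => decide (j + 6 < bv))
  then some (j + 6) else b

-- B's while loop, state (prev, p, nl, j, line); fuel cs.length + 1 suffices because p
-- strictly increases and never exceeds cs.length (the fuel-0 branch repeats the break branch)
def segLoopB (cs : List Char) : Nat → Nat → Nat → Int → Int → List String → List String
  | 0, prev, _, _, _, line => line ++ [String.ofList (PySem.List.slice cs (some (prev : Int)) none)]
  | fuel+1, prev, p, nl, j, line =>
    let nl' := if 0 ≤ nl ∧ nl < (p : Int) then PySem.Chars.findFrom cs ['\n'] (p : Int) else nl
    let j' := if 0 ≤ j ∧ j + 6 < (p : Int)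
      then PySem.Chars.findFrom cs "</w:r>".toList (if 6 ≤ p then ((p - 6 : Nat) : Int) else 0)
      else j
    match segNextB cs nl' j' with
    | none => line ++ [String.ofList (PySem.List.slice cs (some (prev : Int)) none)]
    | some bv => segLoopB cs fuel bv.toNat (bv.toNat + 1) nl' j'
        (line ++ [String.ofList (PySem.List.slice cs (some (prev : Int)) (some bv))])

def segmentationLine_alt (text : String) : List String :=
  let cs := text.toList
  segLoopB cs (cs.length + 1) 0 0
    (PySem.Chars.find cs ['\n']) (PySem.Chars.find cs "</w:r>".toList) []

-- ===== PRECONDITION & SPEC =====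
def Spec_segmentationLine (text : String) (out : List String) : Prop := out = segmentationLine_alt text
instance (text : String) (out : List String) : Decidable (Spec_segmentationLine text out) := by unfold Spec_segmentationLine; infer_instance

-- ===== CLAIM (what is proved, stated in full; the proofs are below) =====
def Claim_equal_segmentationLine : Prop := ∀ (text : String), Dom_segmentationLine text → Spec_segmentationLine text (segmentationLine text)

-- ===== LEMMAS AND PROOFS =====

-- the boundary test of A's scan, on indices
def segTest (cs : List Char) (i : Nat) : Bool :=
  cs[i]? == some '\n' || (decide (6 ≤ i) && ((cs.drop (i - 6)).take 6 == "</w:r>".toList))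

-- segments between successive boundaries, then the tail
def emitSegs (cs : List Char) (prev : Nat) : List Nat → List String
  | [] => [String.ofList (cs.drop prev)]
  | b :: bs => String.ofList ((cs.drop prev).take (b - prev)) :: emitSegs cs b bs

-- a newline at index i / a tag occurrence starting at index q, as prefix facts
def nlAt (cs : List Char) (i : Nat) : Prop := ['\n'] <+: cs.drop i
def tagAt (cs : List Char) (q : Nat) : Prop := "</w:r>".toList <+: cs.drop q

-- the cached newline candidate is valid at cursor p
def InvNl (cs : List Char) (p : Nat) (nl : Int) : Prop :=
  (nl = -1 ∧ ∀ i, p ≤ i → ¬ nlAt cs i) ∨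
  (0 ≤ nl ∧ nlAt cs nl.toNat ∧ ∀ i, p ≤ i → i < nl.toNat → ¬ nlAt cs i)

-- the cached tag candidate is valid at cursor p
def InvTag (cs : List Char) (p : Nat) (j : Int) : Prop :=
  (j = -1 ∧ ∀ q, p ≤ q + 6 → ¬ tagAt cs q) ∨
  (0 ≤ j ∧ tagAt cs j.toNat ∧ ∀ q, p ≤ q + 6 → q < j.toNat → ¬ tagAt cs q)

-- after the refresh step, the candidate is additionally at-or-past the cursor
def StrongNl (cs : List Char) (p : Nat) (nl : Int) : Prop :=
  (nl = -1 ∧ ∀ i, p ≤ i → ¬ nlAt cs i) ∨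
  (0 ≤ nl ∧ p ≤ nl.toNat ∧ nlAt cs nl.toNat ∧ ∀ i, p ≤ i → i < nl.toNat → ¬ nlAt cs i)

def StrongTag (cs : List Char) (p : Nat) (j : Int) : Prop :=
  (j = -1 ∧ ∀ q, p ≤ q + 6 → ¬ tagAt cs q) ∨
  (0 ≤ j ∧ p ≤ j.toNat + 6 ∧ tagAt cs j.toNat ∧ ∀ q, p ≤ q + 6 → q < j.toNat → ¬ tagAt cs q)

lemma nlAt_iff (cs : List Char) (i : Nat) : nlAt cs i ↔ cs[i]? = some '\n' := by
  unfold nlAt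
  rw [← List.head?_drop]
  constructor
  · rintro ⟨t, ht⟩
    rw [← ht]; rfl
  · intro h
    cases hd : cs.drop i with
    | nil => rw [hd] at h; simp at h
    | cons c t =>
        rw [hd] at h
        simp at h
        exact ⟨t, by simp [h]⟩

lemma tagAt_take_iff (cs : List Char) (q : Nat) :
    tagAt cs q ↔ (cs.drop q).take 6 = "</w:r>".toList := by
  unfold tagAt
  rw [List.prefix_iff_eq_take]
  constructor
  · intro h; exact h.symm
  · intro h; exact h.symm

-- a prefix occurrence at i ≥ p is an infix of the drop at p
lemma infix_drop_of_prefix_drop {cs sub : List Char} {p i : Nat} (hpi : p ≤ i)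
    (h : sub <+: cs.drop i) : sub <:+: cs.drop p := by
  have h2 : cs.drop i = (cs.drop p).drop (i - p) := by
    rw [List.drop_drop]; congr 1; omega
  rw [h2] at h
  exact h.isInfix.trans (List.drop_suffix _ _).isInfix

lemma segTest_iff (cs : List Char) (i : Nat) :
    segTest cs i = true ↔ nlAt cs i ∨ (6 ≤ i ∧ tagAt cs (i - 6)) := by
  unfold segTest
  rw [Bool.or_eq_true, Bool.and_eq_true, beq_iff_eq, beq_iff_eq, decide_eq_true_iff,
    ← nlAt_iff, ← tagAt_take_iff]

-- A's per-index condition equals segTest: for i ≥ 6 by slice_natCast; for i < 6 the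
-- negative-start slice is shorter than 6 chars, so it can never equal the tag
lemma condA_eq_segTest (cs : List Char) (i : Nat) (hi : i < cs.length) :
    (PySem.List.pyGet? cs (i : Int) == some '\n'
      || PySem.List.slice cs (some ((i : Int) - 6)) (some (i : Int)) == "</w:r>".toList)
    = segTest cs i := by
  unfold segTest
  rw [PySem.List.pyGet?_natCast]
  by_cases h6 : 6 ≤ i
  · have : (i : Int) - 6 = ((i - 6 : Nat) : Int) := by omega
    rw [this, PySem.List.slice_natCast, show i - (i - 6) = 6 by omega, decide_eq_true h6,
      Bool.true_and]
  · have hlen : (PySem.List.slice cs (some ((i : Int) - 6)) (some (i : Int))).length ≤ 5 := by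
      rw [PySem.List.length_slice]
      have h1 : PySem.List.clampIdx cs.length (i : Int) = min i cs.length :=
        PySem.List.clampIdx_natCast _ _
      omega
    have hne : (PySem.List.slice cs (some ((i : Int) - 6)) (some (i : Int))
        == "</w:r>".toList) = false := by
      rw [beq_eq_false_iff_ne]
      intro h
      rw [h] at hlen
      simp at hlen
    rw [hne, decide_eq_false h6, Bool.false_and, Bool.or_false]

-- A's loop emits exactly the segments over the remaining boundary indices
lemma segLoopA_eq_emitSegs (cs : List Char) :
    ∀ (fuel index indexIn : Nat) (line : List String), cs.length - index = fuel →
      segLoopA cs index indexIn line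
        = line ++ emitSegs cs indexIn ((List.range' index (cs.length - index)).filter (segTest cs)) := by
  intro fuel
  induction fuel with
  | zero =>
      intro index indexIn line h
      rw [segLoopA, dif_neg (by omega), h]
      simp [emitSegs, PySem.List.slice_from_natCast]
  | succ fuel ih =>
      intro index indexIn line h
      have hi : index < cs.length := by omega
      rw [segLoopA, dif_pos hi, condA_eq_segTest cs index hi, h, List.range'_succ,
        List.filter_cons]
      by_cases ht : segTest cs index
      · rw [if_pos ht, ht, if_pos rfl]
        rw [ih (index + 1) index _ (by omega)]
        rw [show cs.length - (index + 1) = fuel by omega]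
        simp [emitSegs, PySem.List.slice_natCast, List.append_assoc]
      · rw [if_neg ht, ih (index + 1) indexIn line (by omega),
          show cs.length - (index + 1) = fuel by omega]
        simp [ht]

-- refresh lemmas: the refresh step upgrades the loop invariant to the strong form
lemma refresh_nl (cs : List Char) (p : Nat) (nl : Int) (hp : p ≤ cs.length)
    (h : InvNl cs p nl) :
    StrongNl cs p (if 0 ≤ nl ∧ nl < (p : Int) then PySem.Chars.findFrom cs ['\n'] (p : Int) else nl) := by
  by_cases hc : 0 ≤ nl ∧ nl < (p : Int)
  · rw [if_pos hc]
    by_cases hr : PySem.Chars.findFrom cs ['\n'] (p : Int) = -1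
    · left
      refine ⟨hr, ?_⟩
      rw [PySem.Chars.findFrom_natCast_eq_neg_one_iff cs ['\n'] p hp] at hr
      intro i hpi hni
      exact hr (infix_drop_of_prefix_drop hpi hni)
    · right
      obtain ⟨h1, h2, h3⟩ := PySem.Chars.findFrom_natCast_spec cs ['\n'] p hp hr
      exact ⟨le_trans (Int.natCast_nonneg p) h1, by omega, h2, h3⟩
  · rw [if_neg hc]
    rw [not_and] at hc
    rcases h with ⟨h1, h2⟩ | ⟨h1, h2, h3⟩
    · exact Or.inl ⟨h1, h2⟩
    · exact Or.inr ⟨h1, by have := hc h1; omega, h2, h3⟩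

lemma refresh_tag (cs : List Char) (p : Nat) (j : Int) (hp : p ≤ cs.length)
    (h : InvTag cs p j) :
    StrongTag cs p (if 0 ≤ j ∧ j + 6 < (p : Int)
      then PySem.Chars.findFrom cs "</w:r>".toList (if 6 ≤ p then ((p - 6 : Nat) : Int) else 0)
      else j) := by
  have hs : (if 6 ≤ p then ((p - 6 : Nat) : Int) else 0)
      = (((if 6 ≤ p then p - 6 else 0 : Nat)) : Int) := by
    split <;> simp
  by_cases hc : 0 ≤ j ∧ j + 6 < (p : Int)
  · rw [if_pos hc, hs]
    have hsN : (if 6 ≤ p then p - 6 else 0 : Nat) ≤ cs.length := by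
      split <;> omega
    have hp6 : p ≤ (if 6 ≤ p then p - 6 else 0 : Nat) + 6 := by
      split <;> omega
    have hq6 : ∀ q, p ≤ q + 6 → (if 6 ≤ p then p - 6 else 0 : Nat) ≤ q := by
      intro q hq
      split <;> omega
    by_cases hr : PySem.Chars.findFrom cs "</w:r>".toList
        ((((if 6 ≤ p then p - 6 else 0 : Nat)) : Int)) = -1
    · left
      refine ⟨hr, ?_⟩
      rw [PySem.Chars.findFrom_natCast_eq_neg_one_iff cs _ _ hsN] at hr
      intro q hpq htq
      exact hr (infix_drop_of_prefix_drop (hq6 q hpq) htq)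
    · right
      obtain ⟨h1, h2, h3⟩ := PySem.Chars.findFrom_natCast_spec cs "</w:r>".toList _ hsN hr
      refine ⟨le_trans (Int.natCast_nonneg _) h1, by omega, h2, ?_⟩
      intro q hpq hlt
      exact h3 q (hq6 q hpq) hlt
  · rw [if_neg hc]
    rw [not_and] at hc
    rcases h with ⟨h1, h2⟩ | ⟨h1, h2, h3⟩
    · exact Or.inl ⟨h1, h2⟩
    · exact Or.inr ⟨h1, by have := hc h1; omega, h2, h3⟩

-- a boundary list splitter
lemma filter_range'_eq_nil (f : Nat → Bool) (p n : Nat)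
    (hmin : ∀ i, p ≤ i → i < n → f i = false) :
    (List.range' p (n - p)).filter f = [] := by
  rw [List.filter_eq_nil_iff]
  intro a ha
  rw [List.mem_range'_1] at ha
  have h1 : p ≤ a ∧ a < n := by omega
  simp [hmin a h1.1 h1.2]


lemma filter_range'_eq_cons (f : Nat → Bool) (p bv n : Nat) (h1 : p ≤ bv) (h2 : bv < n)
    (hb : f bv = true) (hmin : ∀ i, p ≤ i → i < bv → f i = false) :
    (List.range' p (n - p)).filter f = bv :: (List.range' (bv + 1) (n - (bv + 1))).filter f := by
  have e1 : n - p = (bv - p) + (n - bv) := by omega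
  have e2 : n - bv = (n - (bv + 1)) + 1 := by omega
  have hsplit : List.range' p (n - p) = List.range' p (bv - p) ++ List.range' bv (n - bv) := by
    rw [e1, ← List.range'_append]
    congr 2
    omega
  rw [hsplit, List.filter_append]
  have hnil : (List.range' p (bv - p)).filter f = [] := by
    rw [List.filter_eq_nil_iff]
    intro a ha
    rw [List.mem_range'_1] at ha
    simp [hmin a (by omega) (by omega)]
  rw [hnil, List.nil_append, e2, List.range'_succ, List.filter_cons, if_pos hb]

lemma nlAt_lt {cs : List Char} {k : Nat} (h : nlAt cs k) : k < cs.length := by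
  rw [nlAt_iff] at h
  exact (List.getElem?_eq_some_iff.mp h).1

lemma strongNl_mono {cs : List Char} {p q : Nat} {nl : Int}
    (h : StrongNl cs p nl) (hpq : p ≤ q) : InvNl cs q nl := by
  rcases h with ⟨h1, h2⟩ | ⟨h1, _, h3, h4⟩
  · exact Or.inl ⟨h1, fun i hi => h2 i (le_trans hpq hi)⟩
  · exact Or.inr ⟨h1, h3, fun i hi hlt => h4 i (le_trans hpq hi) hlt⟩

lemma strongTag_mono {cs : List Char} {p q : Nat} {j : Int}
    (h : StrongTag cs p j) (hpq : p ≤ q) : InvTag cs q j := by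
  rcases h with ⟨h1, h2⟩ | ⟨h1, _, h3, h4⟩
  · exact Or.inl ⟨h1, fun i hi => h2 i (le_trans hpq hi)⟩
  · exact Or.inr ⟨h1, h3, fun i hi hlt => h4 i (le_trans hpq hi) hlt⟩

-- if the candidate block yields None, there is no boundary at or past the cursor
lemma min_boundary_none (cs : List Char) (p : Nat) (nl' j' : Int)
    (hS : StrongNl cs p nl') (hT : StrongTag cs p j')
    (hb : segNextB cs nl' j' = none) :
    ∀ i, p ≤ i → i < cs.length → segTest cs i = false := by
  intro i hpi hin
  unfold segNextB at hb
  by_cases hnl : nl' = -1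
  · simp only [hnl, bne_self_eq_false] at hb
    cases hst : segTest cs i with
    | false => rfl
    | true =>
        exfalso
        rcases (segTest_iff cs i).mp hst with hN | ⟨h6, hT6⟩
        · rcases hS with ⟨_, hno⟩ | ⟨hge, _⟩
          · exact hno i hpi hN
          · rw [hnl] at hge; norm_num at hge
        · rcases hT with ⟨_, hno⟩ | ⟨hge, _, _, hmin⟩
          · exact hno (i - 6) (by omega)  hT6
          · -- j' points at a real tag; hb forces n ≤ j'+6, but minimality puts j'+6 ≤ i < n
            have hj1 : (j' != -1) = true := by
              simp only [bne_iff_ne, ne_eq]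
              intro h; rw [h] at hge; norm_num at hge
            have hjle : j'.toNat ≤ i - 6 := by
              by_contra hlt
              exact hmin (i - 6) (by omega) (by omega) hT6
            have hnle : ¬ (j' + 6 < (cs.length : Int)) := by
              intro hlt
              simp [hj1, hlt] at hb
            have := Int.toNat_of_nonneg hge
            omega
  · exfalso
    have hnl' : (nl' != -1) = true := by simp [hnl]
    simp only [hnl', if_true] at hb
    split at hb <;> simp at hb

-- if the candidate block yields some bv, bv is the least boundary at or past the cursor
lemma min_boundary_some (cs : List Char) (p : Nat) (nl' j' : Int) (bv : Int)
    (hS : StrongNl cs p nl') (hT : StrongTag cs p j')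
    (hb : segNextB cs nl' j' = some bv) :
    0 ≤ bv ∧ p ≤ bv.toNat ∧ bv.toNat < cs.length ∧ segTest cs bv.toNat = true ∧
      ∀ i, p ≤ i → i < bv.toNat → segTest cs i = false := by
  unfold segNextB at hb
  by_cases hcond : ((j' != -1) && decide (j' + 6 < (cs.length : Int)) &&
      (match (if nl' != -1 then some nl' else none : Option Int) with
        | none => true | some bv => decide (j' + 6 < bv))) = true
  · -- tag candidate selected: bv = j' + 6
    rw [if_pos hcond, Option.some.injEq] at hb
    have hcond' := hcond
    rw [Bool.and_eq_true, Bool.and_eq_true] at hcond'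
    obtain ⟨⟨hj1, hjn⟩, hmatch⟩ := hcond'
    rcases hT with ⟨hj0, _⟩ | ⟨hge, hple, htg, hminT⟩
    · rw [hj0] at hj1; norm_num at hj1
    · have hjnat := Int.toNat_of_nonneg hge
      have hjn' : (j' + 6 : Int) < cs.length := of_decide_eq_true hjn
      refine ⟨by omega, by omega, by omega, ?_, ?_⟩
      · rw [segTest_iff]
        refine Or.inr ⟨by omega, ?_⟩
        have : bv.toNat - 6 = j'.toNat := by omega
        rw [this]; exact htg
      · intro i hpi hilt
        cases hst : segTest cs i with
        | false => rfl
        | true =>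
            exfalso
            rcases (segTest_iff cs i).mp hst with hN | ⟨h6, hT6⟩
            · rcases hS with ⟨_, hno⟩ | ⟨hge2, _, _, hminN⟩
              · exact hno i hpi hN
              · -- nl' real: the match conjunct says bv = j'+6 < nl', so i < bv.toNat < nl'.toNat
                have hnl1 : (nl' != -1) = true := by
                  simp only [bne_iff_ne, ne_eq]
                  intro h; rw [h] at hge2; norm_num at hge2
                rw [hnl1] at hmatch
                simp only [if_true] at hmatch
                have hlt : j' + 6 < nl' := of_decide_eq_true hmatch
                have := Int.toNat_of_nonneg hge2
                exact hminN i hpi (by omega) hN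
            · exact hminT (i - 6) (by omega) (by omega) hT6
  · -- newline candidate selected: bv = nl'
    rw [if_neg hcond] at hb
    have hnl1 : (nl' != -1) = true := by
      by_contra h
      simp only [h] at hb
      simp at hb
    rw [if_pos hnl1, Option.some.injEq] at hb
    rw [hb] at hnl1 hcond
    rw [hb] at hS
    rcases hS with ⟨h0, _⟩ | ⟨hge, hple, hnlat, hminN⟩
    · rw [h0] at hnl1; norm_num at hnl1
    · have hbn : bv.toNat < cs.length := nlAt_lt hnlat
      refine ⟨hge, hple, hbn, by rw [segTest_iff]; exact Or.inl hnlat, ?_⟩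
      intro i hpi hilt
      cases hst : segTest cs i with
      | false => rfl
      | true =>
          exfalso
          rcases (segTest_iff cs i).mp hst with hN | ⟨h6, hT6⟩
          · exact hminN i hpi hilt hN
          · rcases hT with ⟨_, hno⟩ | ⟨hgej, _, _, hminT⟩
            · exact hno (i - 6) (by omega) hT6
            · have hjle : j'.toNat ≤ i - 6 := by
                by_contra hlt
                exact hminT (i - 6) (by omega) (by omega) hT6
              have hj2 := Int.toNat_of_nonneg hgej
              have hbv2 := Int.toNat_of_nonneg hge
              -- then j'+6 ≤ i < bv = nl' and j'+6 < length, so the tag branch should have fired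
              have hc : ((j' != -1) && decide (j' + 6 < (cs.length : Int)) &&
                  (match (if bv != -1 then some bv else none : Option Int) with
                    | none => true | some bv' => decide (j' + 6 < bv'))) = true := by
                rw [hnl1]
                simp only [if_true]
                have h1 : (j' != -1) = true := by
                  simp only [bne_iff_ne, ne_eq]
                  intro h; rw [h] at hgej; norm_num at hgej
                have h2 : (j' + 6 : Int) < cs.length := by omega
                have h3 : j' + 6 < bv := by omega
                simp [h1, h2, h3]
              exact hcond hc

-- the cached candidates of B's initial find calls are valid at cursor 0
lemma init_inv_nl (cs : List Char) : InvNl cs 0 (PySem.Chars.find cs ['\n']) := by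
  by_cases h : PySem.Chars.find cs ['\n'] = -1
  · left
    refine ⟨h, ?_⟩
    rw [PySem.Chars.find_eq_neg_one_iff] at h
    intro i _ hni
    have h2 := infix_drop_of_prefix_drop (Nat.zero_le i) hni
    rw [List.drop_zero] at h2
    exact h h2
  · right
    have h0 : 0 ≤ PySem.Chars.find cs ['\n'] := by
      have := PySem.Chars.neg_one_le_find cs ['\n']
      omega
    obtain ⟨h1, h2⟩ := PySem.Chars.find_spec h0
    exact ⟨h0, h1, fun i _ hi => h2 i hi⟩

lemma init_inv_tag (cs : List Char) : InvTag cs 0 (PySem.Chars.find cs "</w:r>".toList) := by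
  by_cases h : PySem.Chars.find cs "</w:r>".toList = -1
  · left
    refine ⟨h, ?_⟩
    rw [PySem.Chars.find_eq_neg_one_iff] at h
    intro q _ htq
    have h2 := infix_drop_of_prefix_drop (Nat.zero_le q) htq
    rw [List.drop_zero] at h2
    exact h h2
  · right
    have h0 : 0 ≤ PySem.Chars.find cs "</w:r>".toList := by
      have := PySem.Chars.neg_one_le_find cs "</w:r>".toList
      omega
    obtain ⟨h1, h2⟩ := PySem.Chars.find_spec h0
    exact ⟨h0, h1, fun q _ hq => h2 q hq⟩

-- B's loop emits the segments over the remaining boundary indices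
lemma segLoopB_eq_emitSegs (cs : List Char) :
    ∀ (fuel prev p : Nat) (nl j : Int) (line : List String),
      p ≤ cs.length → cs.length + 1 - p ≤ fuel → InvNl cs p nl → InvTag cs p j →
      segLoopB cs fuel prev p nl j line
        = line ++ emitSegs cs prev ((List.range' p (cs.length - p)).filter (segTest cs)) := by
  intro fuel
  induction fuel with
  | zero =>
      intro prev p nl j line hp hf _ _
      exact absurd hf (by omega)
  | succ fuel ih =>
      intro prev p nl j line hp hf hnl htag
      have hS := refresh_nl cs p nl hp hnl
      have hT := refresh_tag cs p j hp htag
      rw [segLoopB]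
      cases hb : segNextB cs
          (if 0 ≤ nl ∧ nl < (p : Int) then PySem.Chars.findFrom cs ['\n'] (p : Int) else nl)
          (if 0 ≤ j ∧ j + 6 < (p : Int)
            then PySem.Chars.findFrom cs "</w:r>".toList (if 6 ≤ p then ((p - 6 : Nat) : Int) else 0)
            else j) with
      | none =>
          rw [filter_range'_eq_nil (segTest cs) p cs.length (min_boundary_none cs p _ _ hS hT hb)]
          simp [emitSegs, PySem.List.slice_from_natCast]
      | some bv =>
          show segLoopB cs fuel bv.toNat (bv.toNat + 1) _ _
              (line ++ [String.ofList (PySem.List.slice cs (some (prev : Int)) (some bv))]) = _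
          obtain ⟨h0, hpb, hbn, hbt, hbmin⟩ := min_boundary_some cs p _ _ bv hS hT hb
          rw [filter_range'_eq_cons (segTest cs) p bv.toNat cs.length hpb hbn hbt hbmin]
          rw [ih bv.toNat (bv.toNat + 1) _ _ _ (by omega) (by omega)
            (strongNl_mono hS (by omega)) (strongTag_mono hT (by omega))]
          have hbv : bv = ((bv.toNat : Nat) : Int) := (Int.toNat_of_nonneg h0).symm
          rw [hbv, PySem.List.slice_natCast]
          simp [emitSegs, List.append_assoc, max_eq_left h0]

-- ===== VERDICT (by name: the statement is the Claim_ definition above) =====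
theorem segmentationLine_spec : Claim_equal_segmentationLine := by
  intro text _
  unfold Spec_segmentationLine segmentationLine segmentationLine_alt
  rw [segLoopA_eq_emitSegs text.toList (text.toList.length - 0) 0 0 [] rfl]
  rw [segLoopB_eq_emitSegs text.toList (text.toList.length + 1) 0 0 _ _ []
    (by omega) (by omega) (init_inv_nl text.toList) (init_inv_tag text.toList)]
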